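-- pv_equiv track=rewrite | github.com/loulou-bvc/job-Finder | email_manager.py | _prioritize_emails
-- ===== SOURCE A (Python) =====
-- from typing import List, Dict, Optional, Set
--
-- def _prioritize_emails(emails: List[str]) -> List[str]:
--     """Prioriser les emails par pertinence"""
--     priority_keywords = [
--         'recrutement', 'rh', 'jobs', 'carrieres', 'contact.rh',
--         'recrutement.rh', 'contact', 'info'
--     ]
--
--     def email_priority(email):
--         email_lower = email.lower()
--         for i, keyword in enumerate(priority_keywords):
--             if keyword in email_lower:
--                 return i
--         return len(priority_keywords)
--
--     return sorted(emails, key=email_priority)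
-- ===== SOURCE B (Python) =====
-- from typing import List
--
-- def _prioritize_emails(emails: List[str]) -> List[str]:
--     """Prioriser les emails par pertinence (bucket/counting sort, comparison-free)"""
--     priority_keywords = [
--         'recrutement', 'rh', 'jobs', 'carrieres', 'contact.rh',
--         'recrutement.rh', 'contact', 'info'
--     ]
--
--     def email_priority(email):
--         email_lower = email.lower()
--         return next((i for i, kw in enumerate(priority_keywords) if kw in email_lower),
--                     len(priority_keywords))
--
--     buckets = [[] for _ in range(len(priority_keywords) + 1)]
--     for email in emails:
--         buckets[email_priority(email)].append(email)
--     return [email for bucket in buckets for email in bucket]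
-- ===== Notes on version B (the rewrite author's own statement) =====
-- stated objective: alternative
-- what changed: Replaces the stable comparison sort with a one-pass bucket (counting) sort: each email is appended to the bucket of its priority class and the 9 buckets are concatenated, preserving input order within equal priorities exactly like the stable sort; B's priority helper is a next()-over-generator first match instead of A's explicit loop.
import Mathlib
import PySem

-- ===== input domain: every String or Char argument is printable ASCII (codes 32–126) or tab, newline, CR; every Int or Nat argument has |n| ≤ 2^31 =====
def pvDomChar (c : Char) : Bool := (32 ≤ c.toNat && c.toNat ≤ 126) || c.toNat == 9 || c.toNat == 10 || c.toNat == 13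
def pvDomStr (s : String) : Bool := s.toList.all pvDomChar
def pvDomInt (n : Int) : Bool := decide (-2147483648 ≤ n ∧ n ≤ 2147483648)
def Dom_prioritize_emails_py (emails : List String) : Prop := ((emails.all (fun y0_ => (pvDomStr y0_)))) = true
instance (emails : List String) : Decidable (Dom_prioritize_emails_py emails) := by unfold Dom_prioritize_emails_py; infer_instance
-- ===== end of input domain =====

-- B replaces the stable comparison sort with a one-pass bucket (counting) sort over the 9 priority classes (alternative algorithm, comparison-free).

-- ===== PORT A =====
-- the priority_keywords list (shared constant of both Python versions)
def pvKeywords : List String :=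
  ["recrutement", "rh", "jobs", "carrieres", "contact.rh",
   "recrutement.rh", "contact", "info"]

-- A's inner helper email_priority: loop over enumerate(priority_keywords), first match wins
def prioLoop (el : String) : List (Int × String) → Int
  | [] => (pvKeywords.length : Int)
  | (i, kw) :: rest => if PySem.Str.isIn kw el then i else prioLoop el rest

def emailPriority (email : String) : Int :=
  prioLoop (PySem.Str.lower email) (PySem.List.enumerate pvKeywords)

def prioritize_emails_py (emails : List String) : List String :=
  PySem.List.sorted emails emailPriority false

-- ===== PORT B =====
-- B's helper: next((i for i, kw in enumerate(priority_keywords) if kw in email_lower), len(...))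
def emailPriorityB (email : String) : Int :=
  (((PySem.List.enumerate pvKeywords).find?
      (fun p => PySem.Str.isIn p.2 (PySem.Str.lower email))).map (·.1)).getD
    (pvKeywords.length : Int)

def prioritize_emails_py_alt (emails : List String) : List String :=
  (emails.foldl (fun bs e => bs.modify (emailPriorityB e).toNat (· ++ [e]))
    ((List.range (pvKeywords.length + 1)).map (fun _ => []))).flatten

-- ===== PRECONDITION & SPEC =====
def Spec_prioritize_emails_py (emails : List String) (out : List String) : Prop := out = prioritize_emails_py_alt emails
instance (emails : List String) (out : List String) : Decidable (Spec_prioritize_emails_py emails out) := by unfold Spec_prioritize_emails_py; infer_instance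

-- ===== CLAIM (what is proved, stated in full; the proofs are below) =====
def Claim_equal_prioritize_emails_py : Prop := ∀ (emails : List String), Dom_prioritize_emails_py emails → Spec_prioritize_emails_py emails (prioritize_emails_py emails)

-- ===== LEMMAS AND PROOFS =====

-- priority is always in [0, 8]
theorem prioLoop_bound (el : String) (l : List (Int × String))
    (h : ∀ p ∈ l, 0 ≤ p.1 ∧ p.1 ≤ 8) : 0 ≤ prioLoop el l ∧ prioLoop el l ≤ 8 := by
  induction l with
  | nil => simp [prioLoop, pvKeywords]
  | cons p rest ih =>
    obtain ⟨i, kw⟩ := p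
    simp only [prioLoop]
    split
    · exact h (i, kw) (by simp)
    · exact ih (fun q hq => h q (by simp [hq]))

theorem emailPriority_bound (e : String) : 0 ≤ emailPriority e ∧ emailPriority e ≤ 8 := by
  apply prioLoop_bound
  intro p hp
  have : PySem.List.enumerate pvKeywords =
      [(0, "recrutement"), (1, "rh"), (2, "jobs"), (3, "carrieres"), (4, "contact.rh"),
       (5, "recrutement.rh"), (6, "contact"), (7, "info")] := by decide
  rw [this] at hp
  fin_cases hp <;> simp

-- Nat-valued key
def keyN (e : String) : Nat := (emailPriority e).toNat

theorem keyN_bound (e : String) : keyN e ≤ 8 := by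
  have h := emailPriority_bound e
  unfold keyN; omega

-- insertBy equations and insertion lemmas
theorem insertBy_cons {α : Type} (b : α → α → Bool) (x y : α) (ys : List α) :
    PySem.List.insertBy b x (y :: ys) =
      if b x y then x :: y :: ys else y :: PySem.List.insertBy b x ys := rfl

theorem insertBy_prefix {α : Type} (b : α → α → Bool) (x : α) (ys zs : List α)
    (h : ∀ y ∈ ys, b x y = false) :
    PySem.List.insertBy b x (ys ++ zs) = ys ++ PySem.List.insertBy b x zs := by
  induction ys with
  | nil => simp
  | cons y t ih =>
    rw [List.cons_append, insertBy_cons, h y (by simp), if_neg (by simp)]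
    rw [ih (fun z hz => h z (by simp [hz]))]
    rfl

theorem insertBy_all_true {α : Type} (b : α → α → Bool) (x : α) (zs : List α)
    (h : ∀ z ∈ zs, b x z = true) :
    PySem.List.insertBy b x zs = x :: zs := by
  cases zs with
  | nil => rfl
  | cons z t => rw [insertBy_cons, h z (by simp), if_pos rfl]

-- splitting range (K+1) at k0 ≤ K
theorem range_split (K k0 : Nat) (h : k0 ≤ K) :
    List.range (K + 1) =
      List.range k0 ++ [k0] ++ (List.range (K - k0)).map (fun j => k0 + 1 + j) := by
  have h1 : K + 1 = k0 + (1 + (K - k0)) := by omega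
  rw [h1, List.range_add, List.range_add]
  simp only [List.range_one, List.map_cons, List.map_map,
    Function.comp_def, Nat.add_zero, List.append_assoc, List.singleton_append]
  congr 1
  congr 1
  apply List.map_congr_left; intro j _; omega

-- membership in a flattened bucket slice
theorem mem_flatten_buckets {α : Type} (key : α → Nat) (xs : List α) (ks : List Nat) (y : α)
    (hy : y ∈ ((ks.map (fun k => xs.filter (fun x => key x == k))).flatten)) :
    key y ∈ ks := by
  simp only [List.mem_flatten, List.mem_map] at hy
  obtain ⟨l, ⟨k, hk, rfl⟩, hyl⟩ := hy
  have := List.of_mem_filter hyl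
  simp only [beq_iff_eq] at this
  rwa [this]

-- the stable sort is the concatenation of the priority buckets
theorem sorted_eq_buckets {α : Type} (key : α → Nat) (K : Nat) (hK : ∀ x, key x ≤ K)
    (xs : List α) :
    PySem.List.sorted xs key false =
      ((List.range (K + 1)).map (fun k => xs.filter (fun x => key x == k))).flatten := by
  induction xs using List.reverseRecOn with
  | nil => simp [PySem.List.sorted]
  | append_singleton xs x ih =>
    have hfold := PySem.List.sorted_eq_foldl_insertBy (xs := xs ++ [x]) (key := key)
    rw [hfold, List.foldl_append, List.foldl_cons, List.foldl_nil,
      ← PySem.List.sorted_eq_foldl_insertBy, ih]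
    have hsplit := range_split K (key x) (hK x)
    rw [hsplit]
    simp only [List.map_append, List.flatten_append, List.map_cons, List.map_nil,
      List.flatten_cons, List.flatten_nil, List.append_nil]
    have hmidnew : (xs ++ [x]).filter (fun y => key y == key x) =
        xs.filter (fun y => key y == key x) ++ [x] := by
      rw [List.filter_append]; simp
    have hLnew : ((List.range (key x)).map (fun k => (xs ++ [x]).filter (fun y => key y == k))) =
        ((List.range (key x)).map (fun k => xs.filter (fun y => key y == k))) := by
      apply List.map_congr_left; intro k hk
      rw [List.filter_append]
      have : key x ≠ k := by simp at hk; omega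
      simp [this]
    have hRnew : (((List.range (K - key x)).map (fun j => key x + 1 + j)).map
          (fun k => (xs ++ [x]).filter (fun y => key y == k))) =
        (((List.range (K - key x)).map (fun j => key x + 1 + j)).map
          (fun k => xs.filter (fun y => key y == k))) := by
      apply List.map_congr_left; intro k hk
      rw [List.filter_append]
      have : key x ≠ k := by
        simp only [List.mem_map, List.mem_range] at hk
        obtain ⟨j, hj, rfl⟩ := hk; omega
      simp [this]
    rw [hLnew, hRnew, hmidnew]
    set Lo := ((List.range (key x)).map (fun k => xs.filter (fun y => key y == k))).flatten with hLo
    set Md := xs.filter (fun y => key y == key x) with hMd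
    set Ro := (((List.range (K - key x)).map (fun j => key x + 1 + j)).map
        (fun k => xs.filter (fun y => key y == k))).flatten with hRo
    set b : α → α → Bool := fun a c => decide (key a < key c) with hb
    have hfalse : ∀ y ∈ Lo ++ Md, b x y = false := by
      intro y hy
      rcases List.mem_append.mp hy with hy | hy
      · have := mem_flatten_buckets key xs (List.range (key x)) y (hLo ▸ hy)
        simp only [List.mem_range] at this
        simp [hb]; omega
      · have := List.of_mem_filter (hMd ▸ hy)
        simp only [beq_iff_eq] at this
        simp [hb, this]
    have htrue : ∀ z ∈ Ro, b x z = true := by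
      intro z hz
      have := mem_flatten_buckets key xs ((List.range (K - key x)).map (fun j => key x + 1 + j))
        z (hRo ▸ hz)
      simp only [List.mem_map, List.mem_range] at this
      obtain ⟨j, hj, hjz⟩ := this
      simp [hb]; omega
    rw [insertBy_prefix b x (Lo ++ Md) Ro hfalse, insertBy_all_true b x Ro htrue]
    simp

-- modify on a map over range
theorem modify_map_range {α : Type} (n i : Nat) (f : Nat → α) (g : α → α) :
    ((List.range n).map f).modify i g =
      (List.range n).map (fun k => if i = k then g (f k) else f k) := by
  apply List.ext_getElem
  · simp
  · intro j h1 h2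
    simp [List.getElem_modify]

-- B's fold builds exactly the buckets
theorem foldl_buckets {α : Type} (key : α → Nat) (K : Nat) (xs : List α) :
    xs.foldl (fun bs x => bs.modify (key x) (· ++ [x]))
        ((List.range (K + 1)).map (fun _ => [])) =
      (List.range (K + 1)).map (fun k => xs.filter (fun x => key x == k)) := by
  induction xs using List.reverseRecOn with
  | nil => simp
  | append_singleton xs x ih =>
    rw [List.foldl_append, ih]
    simp only [List.foldl_cons, List.foldl_nil]
    rw [modify_map_range (K + 1) (key x)]
    apply List.map_congr_left
    intro k hk
    rw [List.filter_append]
    by_cases h : key x = k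
    · simp [h]
    · simp [h]

-- the two before-relations agree (priorities are nonnegative)
theorem sorted_key_eq (xs : List String) :
    PySem.List.sorted xs emailPriority false = PySem.List.sorted xs keyN false := by
  rw [PySem.List.sorted_eq_foldl_insertBy, PySem.List.sorted_eq_foldl_insertBy]
  have : (fun (a c : String) => decide (emailPriority a < emailPriority c)) =
      (fun (a c : String) => decide (keyN a < keyN c)) := by
    funext a c
    have ha := emailPriority_bound a
    have hc := emailPriority_bound c
    simp only [decide_eq_decide]
    unfold keyN; omega
  rw [this]

-- B's first-match-by-find? helper computes the same priority as A's loop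
theorem find?_eq_prioLoop (el : String) (l : List (Int × String)) :
    (((l.find? (fun p => PySem.Str.isIn p.2 el)).map (·.1)).getD (pvKeywords.length : Int)) =
      prioLoop el l := by
  induction l with
  | nil => rfl
  | cons p rest ih =>
    obtain ⟨i, kw⟩ := p
    rw [List.find?_cons]
    by_cases h : PySem.Chars.isIn kw.toList el.toList
    · simp [prioLoop, PySem.Str.isIn, h]
    · simp only [prioLoop, PySem.Str.isIn, h, Bool.false_eq_true, if_false]
      simpa [PySem.Str.isIn] using ih

theorem emailPriorityB_eq (e : String) : emailPriorityB e = emailPriority e := by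
  unfold emailPriorityB emailPriority
  exact find?_eq_prioLoop (PySem.Str.lower e) (PySem.List.enumerate pvKeywords)

-- ===== VERDICT (by name: the statement is the Claim_ definition above) =====
theorem prioritize_emails_py_spec : Claim_equal_prioritize_emails_py := by
  intro emails _
  unfold Spec_prioritize_emails_py prioritize_emails_py prioritize_emails_py_alt
  have hlen : pvKeywords.length = 8 := by decide
  rw [hlen, sorted_key_eq, sorted_eq_buckets keyN 8 keyN_bound]
  simp only [emailPriorityB_eq]
  have hB : emails.foldl (fun bs e => bs.modify (emailPriority e).toNat (· ++ [e]))
      ((List.range (8 + 1)).map (fun _ => ([] : List String)))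
      = (List.range (8 + 1)).map (fun k => emails.filter (fun e => keyN e == k)) :=
    foldl_buckets keyN 8 emails
  rw [hB]
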